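-- pv_equiv track=rewrite | github.com/nla-group/classix | exp/run_facial_cluster.py | order_pics
-- ===== SOURCE A (Python) =====
-- def order_pics(figs):
--     images = list()
--     labels = list()
--     for i in range(40):
--         num = i + 1
--         for img in figs:
--             try:
--                 if int(img.split('_')[1].replace('.jpg','')) == num:
--                     images.append(img)
--                     labels.append(num)
--             except:
--                 pass
--     return images, labels
-- ===== SOURCE B (Python) =====
-- def order_pics(figs):
--     # One bucketing pass over figs instead of 40 rescans; buckets preserve input order.
--     buckets = [[] for _ in range(41)]
--     for img in figs:
--         try:
--             num = int(img.split('_')[1].replace('.jpg', ''))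
--         except:
--             continue
--         if 1 <= num <= 40:
--             buckets[num].append(img)
--     images = []
--     labels = []
--     for num in range(1, 41):
--         for img in buckets[num]:
--             images.append(img)
--             labels.append(num)
--     return images, labels
-- ===== Notes on version B (the rewrite author's own statement) =====
-- stated objective: faster
-- what changed: Instead of rescanning figs once for each of the 40 label values, B parses each filename once, drops it into one of 40 order-preserving buckets, and then concatenates the buckets 1..40.
import Mathlib
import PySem

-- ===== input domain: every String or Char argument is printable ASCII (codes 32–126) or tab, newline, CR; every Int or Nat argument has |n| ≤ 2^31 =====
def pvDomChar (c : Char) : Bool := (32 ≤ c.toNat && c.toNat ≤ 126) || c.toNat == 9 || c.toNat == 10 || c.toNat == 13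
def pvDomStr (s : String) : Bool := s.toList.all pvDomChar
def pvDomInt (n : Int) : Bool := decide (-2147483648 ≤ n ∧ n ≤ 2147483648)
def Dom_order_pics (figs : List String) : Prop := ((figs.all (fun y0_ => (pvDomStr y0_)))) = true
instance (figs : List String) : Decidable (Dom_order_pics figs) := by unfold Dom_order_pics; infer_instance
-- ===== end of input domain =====

-- B replaces A's 40 rescans of figs (one per label value) by a single parse-and-bucket pass
-- followed by concatenating the buckets 1..40; same return value.

-- shared helper: int(img.split('_')[1].replace('.jpg','')), none exactly where Python raises
def pvParse (img : String) : Option Int :=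
  match PySem.List.pyGet? (PySem.Chars.splitOn img.toList ['_']) 1 with
  | none => none
  | some s => PySem.Int.ofChars? (PySem.Chars.replace s ['.', 'j', 'p', 'g'] [])

-- ===== PORT A =====
def order_pics (figs : List String) : List String × List Int :=
  (PySem.List.pyRange 0 40 1).foldl (fun st i =>
    figs.foldl (fun st img =>
      match pvParse img with
      | some v => if v = i + 1 then (st.1 ++ [img], st.2 ++ [i + 1]) else st
      | none => st) st) ([], [])

-- ===== PORT B =====
def order_pics_alt (figs : List String) : List String × List Int :=
  let buckets : List (List String) :=
    figs.foldl (fun bs img =>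
      match pvParse img with
      | some v => if 1 ≤ v ∧ v ≤ 40 then bs.set v.toNat (bs.getD v.toNat [] ++ [img]) else bs
      | none => bs) (List.replicate 41 [])
  (PySem.List.pyRange 1 41 1).foldl (fun st num =>
    (buckets.getD num.toNat []).foldl (fun st img => (st.1 ++ [img], st.2 ++ [num])) st) ([], [])

-- ===== PRECONDITION & SPEC =====
def Spec_order_pics (figs : List String) (out : List String × List Int) : Prop := out = order_pics_alt figs
instance (figs : List String) (out : List String × List Int) : Decidable (Spec_order_pics figs out) := by unfold Spec_order_pics; infer_instance

-- ===== CLAIM (what is proved, stated in full; the proofs are below) =====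
def Claim_equal_order_pics : Prop := ∀ (figs : List String), Dom_order_pics figs → Spec_order_pics figs (order_pics figs)

-- ===== LEMMAS AND PROOFS =====

-- the filenames whose parsed number equals num, in figs order
def pvF (num : Int) (figs : List String) : List String :=
  figs.filter (fun img => pvParse img == some num)

-- A's inner loop over figs for a fixed label value
theorem pv_innerA (num : Int) (figs : List String) : ∀ st : List String × List Int,
    figs.foldl (fun st img =>
      match pvParse img with
      | some v => if v = num then (st.1 ++ [img], st.2 ++ [num]) else st
      | none => st) st
    = (st.1 ++ pvF num figs, st.2 ++ (pvF num figs).map (fun _ => num)) := by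
  induction figs with
  | nil => intro st; simp [pvF]
  | cons img rest ih =>
    intro st
    rw [List.foldl_cons]
    have hstep : (match pvParse img with
      | some v => if v = num then (st.1 ++ [img], st.2 ++ [num]) else st
      | none => st)
      = if pvParse img == some num then (st.1 ++ [img], st.2 ++ [num]) else st := by
      cases h : pvParse img with
      | none => simp
      | some v => by_cases hv : v = num <;> simp [hv]
    rw [hstep]
    by_cases h : pvParse img == some num
    · rw [if_pos h, ih]; simp [pvF, h]
    · rw [if_neg h, ih]; simp [pvF, h]

-- A's outer loop over the label values
theorem pv_outerA (figs : List String) : ∀ nums : List Int, ∀ st : List String × List Int,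
    nums.foldl (fun st i =>
      figs.foldl (fun st img =>
        match pvParse img with
        | some v => if v = i + 1 then (st.1 ++ [img], st.2 ++ [i + 1]) else st
        | none => st) st) st
    = (st.1 ++ nums.flatMap (fun i => pvF (i + 1) figs),
       st.2 ++ nums.flatMap (fun i => (pvF (i + 1) figs).map (fun _ => i + 1))) := by
  intro nums
  induction nums with
  | nil => intro st; simp
  | cons n rest ih =>
    intro st
    rw [List.foldl_cons, pv_innerA (n + 1) figs st, ih]
    simp [List.append_assoc]

-- B's emission loop over the buckets
theorem pv_outerB (g : Int → List String) : ∀ nums : List Int, ∀ st : List String × List Int,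
    nums.foldl (fun st n => (g n).foldl (fun st img => (st.1 ++ [img], st.2 ++ [n])) st) st
    = (st.1 ++ nums.flatMap g, st.2 ++ nums.flatMap (fun n => (g n).map (fun _ => n))) := by
  intro nums
  induction nums with
  | nil => intro st; simp
  | cons n rest ih =>
    intro st
    have hfold : ∀ (xs : List String) (st : List String × List Int),
        xs.foldl (fun st img => (st.1 ++ [img], st.2 ++ [n])) st
        = (st.1 ++ xs, st.2 ++ xs.map (fun _ => n)) := by
      intro xs
      induction xs with
      | nil => intro st; simp
      | cons x xs ihx => intro st; simp [ihx]
    rw [List.foldl_cons, hfold, ih]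
    simp [List.append_assoc]

-- B's bucketing pass: bucket k collects exactly the filenames parsing to k, in order
theorem pv_bucket_inv : ∀ (figs : List String) (bs : List (List String)), bs.length = 41 →
    ∀ k : Nat, 1 ≤ k → k ≤ 40 →
    (figs.foldl (fun bs img =>
      match pvParse img with
      | some v => if 1 ≤ v ∧ v ≤ 40 then bs.set v.toNat (bs.getD v.toNat [] ++ [img]) else bs
      | none => bs) bs).getD k []
    = bs.getD k [] ++ pvF (k : Int) figs := by
  intro figs
  induction figs with
  | nil => intro bs _ k _ _; simp [pvF]
  | cons img rest ih =>
    intro bs hlen k hk1 hk2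
    rw [List.foldl_cons]
    cases h : pvParse img with
    | none =>
      rw [ih bs hlen k hk1 hk2]
      simp [pvF, h]
    | some v =>
      by_cases hv : 1 ≤ v ∧ v ≤ 40
      · simp only [if_pos hv]
        rw [ih _ (by simp [hlen]) k hk1 hk2]
        by_cases hvk : v = (k : Int)
        · have hnk : v.toNat = k := by omega
          rw [hnk, List.getD, List.getElem?_set_self (by rw [hlen]; omega)]
          simp only [Option.getD_some, pvF, List.filter_cons, h]
          simp [hvk, List.append_assoc]
        · have hnk : v.toNat ≠ k := by omega
          rw [List.getD, List.getElem?_set_ne hnk]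
          simp [pvF, h, hvk, List.getD]
      · simp only [if_neg hv]
        rw [ih bs hlen k hk1 hk2]
        have hne : v ≠ (k : Int) := by omega
        simp [pvF, h, hne]

-- ===== VERDICT (by name: the statement is the Claim_ definition above) =====
theorem order_pics_spec : Claim_equal_order_pics := by
  unfold Claim_equal_order_pics Spec_order_pics
  intro figs _
  unfold order_pics order_pics_alt
  rw [pv_outerA figs _ ([], []), pv_outerB _ _ ([], [])]
  have hrange : PySem.List.pyRange 1 41 1 = (PySem.List.pyRange 0 40 1).map (fun i => i + 1) := by
    decide
  rw [hrange, List.flatMap_map, List.flatMap_map]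
  have hbucket : ∀ i ∈ PySem.List.pyRange 0 40 1,
      (figs.foldl (fun bs img =>
        match pvParse img with
        | some v => if 1 ≤ v ∧ v ≤ 40 then bs.set v.toNat (bs.getD v.toNat [] ++ [img]) else bs
        | none => bs) (List.replicate 41 [])).getD (i + 1).toNat []
      = pvF (i + 1) figs := by
    intro i hi
    rw [PySem.List.mem_pyRange_one] at hi
    have h1 : 1 ≤ (i + 1).toNat := by omega
    have h2 : (i + 1).toNat ≤ 40 := by omega
    rw [pv_bucket_inv figs _ (by simp) _ h1 h2]
    have hcast : (((i + 1).toNat : Nat) : Int) = i + 1 := by omega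
    have hrep : (List.replicate 41 ([] : List String)).getD (i + 1).toNat [] = [] := by
      rw [List.getD, List.getElem?_replicate]
      split <;> simp
    rw [hrep, hcast, List.nil_append]
  simp only [Prod.mk.injEq, List.nil_append]
  constructor
  · exact (List.flatMap_congr (fun i hi => (hbucket i hi).symm))
  · refine List.flatMap_congr (fun i hi => ?_)
    rw [hbucket i hi]
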